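-- pv_equiv track=rewrite | github.com/niranjana-2004/coding_practice | arrMultiply.py | arrMultiply
-- ===== SOURCE A (Python) =====
-- def arrMultiply(arr):
--     epdt=1
--     opdt=1
--     for i in range(len(arr)):
--         if i%2==0:
--             epdt*=arr[i]
--         else:
--             opdt*=arr[i]
--     return epdt,opdt
-- ===== SOURCE B (Python) =====
-- def arrMultiply(arr):
--     # Two separate passes over the two parity slices instead of one
--     # interleaved parity-checked loop.
--     epdt = 1
--     for x in arr[::2]:
--         epdt *= x
--     opdt = 1
--     for x in arr[1::2]:
--         opdt *= x
--     return epdt, opdt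
-- ===== Notes on version B (the rewrite author's own statement) =====
-- stated objective: simpler
-- what changed: Replaces the single index-driven loop with a parity test by two plain passes, each over one of the two step-2 slices arr[::2] and arr[1::2], with no index arithmetic.
import Mathlib
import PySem

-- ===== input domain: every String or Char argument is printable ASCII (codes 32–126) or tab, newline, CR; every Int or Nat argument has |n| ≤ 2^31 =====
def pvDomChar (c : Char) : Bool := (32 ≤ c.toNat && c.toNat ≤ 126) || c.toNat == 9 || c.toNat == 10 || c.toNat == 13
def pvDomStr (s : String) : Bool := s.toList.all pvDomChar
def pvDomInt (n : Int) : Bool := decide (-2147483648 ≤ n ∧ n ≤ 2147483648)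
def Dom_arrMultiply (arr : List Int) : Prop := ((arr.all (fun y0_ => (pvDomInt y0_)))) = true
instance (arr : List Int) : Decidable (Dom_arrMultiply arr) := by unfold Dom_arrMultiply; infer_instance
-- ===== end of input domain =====

-- B replaces A's single index-driven parity-checked loop by two plain product passes
-- over the two step-2 slices arr[::2] and arr[1::2] (objective: simpler).


-- ===== PORT A =====
-- for i in range(len(arr)): if i%2==0: epdt*=arr[i] else: opdt*=arr[i]
def arrMultiply (arr : List Int) : Int × Int :=
  (PySem.List.pyRange 0 (arr.length : Int) 1).foldl
    (fun s i =>
      if PySem.Int.mod i 2 == 0 then (s.1 * PySem.List.pyGetD arr i 0, s.2)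
      else (s.1, s.2 * PySem.List.pyGetD arr i 0))
    (1, 1)

-- ===== PORT B =====
-- hand port of the step-2 slice xs[::2] (PySem.List.slice has no step argument);
-- exact: every second element starting at index 0
def pvEveryOther : List Int → List Int
  | [] => []
  | [x] => [x]
  | x :: _ :: rest => x :: pvEveryOther rest

-- arr[1::2] is ported as pvEveryOther (arr.drop 1)
def arrMultiply_alt (arr : List Int) : Int × Int :=
  ((pvEveryOther arr).foldl (fun p x => p * x) 1,
   (pvEveryOther (arr.drop 1)).foldl (fun p x => p * x) 1)

-- ===== PRECONDITION & SPEC =====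
def Spec_arrMultiply (arr : List Int) (out : Int × Int) : Prop := out = arrMultiply_alt arr
instance (arr : List Int) (out : Int × Int) : Decidable (Spec_arrMultiply arr out) := by unfold Spec_arrMultiply; infer_instance

-- ===== CLAIM (what is proved, stated in full; the proofs are below) =====
def Claim_equal_arrMultiply : Prop := ∀ (arr : List Int), Dom_arrMultiply arr → Spec_arrMultiply arr (arrMultiply arr)

-- ===== LEMMAS AND PROOFS =====
theorem pvMod2 (s : Int) : PySem.Int.mod s 2 = s % 2 := by
  simp [PySem.Int.mod, Int.fmod_eq_emod]

theorem pvEveryOther_cons (y : Int) (rest : List Int) :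
    pvEveryOther (y :: rest) = y :: pvEveryOther (rest.drop 1) := by
  cases rest <;> simp [pvEveryOther]

theorem pvFoldlMulShift (l : List Int) (a : Int) :
    l.foldl (fun p x => p * x) a = a * l.foldl (fun p x => p * x) 1 := by
  induction l generalizing a with
  | nil => simp
  | cons x t ih =>
    simp only [List.foldl_cons]
    rw [ih (a * x), ih (1 * x)]
    ring

theorem pvEnumFold (arr : List Int) : ∀ (s e o : Int), s % 2 = 0 →
    (PySem.List.enumerate arr s).foldl
      (fun acc p =>
        if PySem.Int.mod p.1 2 == 0 then (acc.1 * p.2, acc.2)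
        else (acc.1, acc.2 * p.2)) (e, o) =
    (e * (pvEveryOther arr).foldl (fun p x => p * x) 1,
     o * (pvEveryOther (arr.drop 1)).foldl (fun p x => p * x) 1) := by
  induction arr using pvEveryOther.induct with
  | case1 =>
    intro s e o hs
    simp [PySem.List.enumerate, pvEveryOther]
  | case2 x =>
    intro s e o hs
    simp [PySem.List.enumerate, pvEveryOther, hs]
  | case3 x y rest ih =>
    intro s e o hs
    have h1 : (s + 1) % 2 = 1 := by omega
    have h2 : (s + 2) % 2 = 0 := by omega
    have he : PySem.List.enumerate (x :: y :: rest) s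
        = (s, x) :: (s + 1, y) :: PySem.List.enumerate rest (s + 1 + 1) := by
      simp [PySem.List.enumerate]
    rw [he]
    simp only [List.foldl_cons, pvMod2, hs, h1]
    have hb0 : (((0:Int) == 0) = true) = True := by decide
    have hb1 : (((1:Int) == 0) = true) = False := by decide
    simp only [hb0, hb1, if_true, if_false]
    simp only [pvMod2] at ih
    rw [show s + 1 + 1 = s + 2 from by ring, ih (s + 2) (e * x) (o * y) h2]
    simp only [List.drop_succ_cons, List.drop_zero]
    rw [pvEveryOther_cons y rest]
    simp only [pvEveryOther, List.foldl_cons]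
    rw [pvFoldlMulShift (pvEveryOther rest) (1 * x),
        pvFoldlMulShift (pvEveryOther (rest.drop 1)) (1 * y)]
    simp only [Prod.mk.injEq]
    constructor <;> ring

-- ===== VERDICT (by name: the statement is the Claim_ definition above) =====
theorem arrMultiply_spec : Claim_equal_arrMultiply := by
  intro arr _
  unfold Spec_arrMultiply arrMultiply arrMultiply_alt
  have hmap := PySem.List.enumerate_eq_map_pyRange (xs := arr) (d := (0 : Int))
  have hlen : PySem.List.len arr = (arr.length : Int) := by simp
  rw [hlen] at hmap
  rw [← List.foldl_map (f := fun j => (j, PySem.List.pyGetD arr j 0))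
    (g := fun (acc : Int × Int) (p : Int × Int) =>
      if PySem.Int.mod p.1 2 == 0 then (acc.1 * p.2, acc.2)
      else (acc.1, acc.2 * p.2)), ← hmap]
  rw [pvEnumFold arr 0 1 1 (by decide)]
  simp
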